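-- pv_equiv track=rewrite | github.com/ntousakiIoanna/commentz_walter | commentz_walter.py | createtableS1
-- ===== SOURCE A (Python) =====
-- def createtableS1(trie, set1, pmin, depth):
--
--     s1 = [1 for j in range(len(trie))]
--     for node in range(len(trie)):
--         if node != 0:
--             if node not in set1:
--                 s1[node] = pmin
--             else:
--                 s1[node] = min(pmin, min([depth[i] - depth[node] for i in set1[node]]))
--     return s1
-- ===== SOURCE B (Python) =====
-- def createtableS1(trie, set1, pmin, depth):
--     n = len(trie)
--     overrides = sorted(
--         ((node, min(pmin, min(depth[i] - depth[node] for i in members)))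
--          for node, members in set1.items() if 0 < node < n),
--         key=lambda t: t[0])
--     out = [1] if n else []
--     prev = 0
--     for node, val in overrides:
--         out += [pmin] * (node - prev - 1)
--         out.append(val)
--         prev = node
--     out += [pmin] * (n - prev - 1)
--     return out
-- ===== Notes on version B (the rewrite author's own statement) =====
-- stated objective: alternative
-- what changed: B extracts the in-range override entries from set1, sorts them by node, and emits the output table as concatenated runs (a [pmin]-gap between consecutive override nodes, then the override value), instead of A's scan over every trie index with a dict membership test and in-place list updates.
import Mathlib
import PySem

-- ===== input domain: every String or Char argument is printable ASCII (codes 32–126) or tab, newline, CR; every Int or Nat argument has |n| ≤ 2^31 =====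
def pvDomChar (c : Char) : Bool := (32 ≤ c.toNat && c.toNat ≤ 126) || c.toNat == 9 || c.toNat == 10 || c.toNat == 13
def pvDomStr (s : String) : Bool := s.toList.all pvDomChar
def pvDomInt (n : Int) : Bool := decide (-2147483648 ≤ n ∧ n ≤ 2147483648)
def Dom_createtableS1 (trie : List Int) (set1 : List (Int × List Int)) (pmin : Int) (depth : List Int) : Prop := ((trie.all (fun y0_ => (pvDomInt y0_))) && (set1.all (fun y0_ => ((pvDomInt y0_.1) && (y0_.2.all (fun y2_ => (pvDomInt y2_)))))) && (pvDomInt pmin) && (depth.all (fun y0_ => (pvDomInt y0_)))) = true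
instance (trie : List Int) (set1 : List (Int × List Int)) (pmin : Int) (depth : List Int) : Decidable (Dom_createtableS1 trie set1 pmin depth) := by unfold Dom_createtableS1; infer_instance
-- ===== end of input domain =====

-- B sorts set1's in-range override entries by node and emits the table as concatenated
-- runs of pmin between consecutive override nodes, instead of A's per-index scan with a
-- dict membership test and in-place updates; objective: alternative algorithm, same cost class.


-- ===== PORT A =====
def createtableS1 (trie : List Int) (set1 : List (Int × List Int)) (pmin : Int) (depth : List Int) : List Int :=
  (List.range trie.length).foldl
    (fun (s1 : List Int) (node : Nat) =>
      if node ≠ 0 then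
        match set1.lookup (node : Int) with
        | none => s1.set node pmin
        | some ms => s1.set node (min pmin ((PySem.List.min? (ms.map (fun i => PySem.List.pyGetD depth i 0 - PySem.List.pyGetD depth (node : Int) 0)) (fun x => x)).getD 0))
      else s1)
    ((List.range trie.length).map (fun _ => (1 : Int)))

-- ===== PORT B =====
-- the override pairs: (node, min(pmin, min(depth[i]-depth[node] for i in members))) for
-- in-range nonzero nodes of set1, sorted by node (key=lambda t: t[0])
def pvOverrides (trie : List Int) (set1 : List (Int × List Int)) (pmin : Int) (depth : List Int) : List (Int × Int) :=
  PySem.List.sorted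
    (set1.filterMap (fun kv =>
      if 0 < kv.1 ∧ kv.1 < (trie.length : Int) then
        some (kv.1, min pmin ((PySem.List.min? (kv.2.map (fun i => PySem.List.pyGetD depth i 0 - PySem.List.pyGetD depth kv.1 0)) (fun x => x)).getD 0))
      else none))
    (fun t => t.1) false

def createtableS1_alt (trie : List Int) (set1 : List (Int × List Int)) (pmin : Int) (depth : List Int) : List Int :=
  let n : Int := (trie.length : Int)
  let st := (pvOverrides trie set1 pmin depth).foldl
    (fun (st : List Int × Int) (kv : Int × Int) =>
      (st.1 ++ List.replicate (kv.1 - st.2 - 1).toNat pmin ++ [kv.2], kv.1))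
    ((if trie.length ≠ 0 then [(1 : Int)] else []), (0 : Int))
  st.1 ++ List.replicate (n - st.2 - 1).toNat pmin

-- ===== PRECONDITION & SPEC =====
-- Pre_ excludes (a) association lists with duplicate keys, which cannot arise from a Python
-- dict (set1 is a dict in the source), and (b) inputs where A raises: an in-range nonzero
-- set1 key with an empty member list (ValueError from min of an empty list) or with a member
-- index out of depth's range, or a key out of depth's range (IndexError).
def Pre_createtableS1 (trie : List Int) (set1 : List (Int × List Int)) (pmin : Int) (depth : List Int) : Prop :=
  (set1.map Prod.fst).Nodup ∧
  ∀ kv ∈ set1, 0 < kv.1 → kv.1 < (trie.length : Int) →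
    (kv.2 ≠ [] ∧ kv.1 < (depth.length : Int) ∧ ∀ i ∈ kv.2, PySem.Raise.InRange depth.length i)
instance (trie : List Int) (set1 : List (Int × List Int)) (pmin : Int) (depth : List Int) : Decidable (Pre_createtableS1 trie set1 pmin depth) := by unfold Pre_createtableS1; infer_instance

def pvWitness_createtableS1 : List Int × (List (Int × List Int)) × Int × List Int :=
  ([0, 0, 0], [(1, [2])], 2, [0, 1, 2])

def Spec_createtableS1 (trie : List Int) (set1 : List (Int × List Int)) (pmin : Int) (depth : List Int) (out : List Int) : Prop := out = createtableS1_alt trie set1 pmin depth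
instance (trie : List Int) (set1 : List (Int × List Int)) (pmin : Int) (depth : List Int) (out : List Int) : Decidable (Spec_createtableS1 trie set1 pmin depth out) := by unfold Spec_createtableS1; infer_instance

-- ===== CLAIM (what is proved, stated in full; the proofs are below) =====
def Claim_equal_createtableS1 : Prop := ∀ (trie : List Int) (set1 : List (Int × List Int)) (pmin : Int) (depth : List Int), Dom_createtableS1 trie set1 pmin depth → Pre_createtableS1 trie set1 pmin depth → Spec_createtableS1 trie set1 pmin depth (createtableS1 trie set1 pmin depth)

-- ===== LEMMAS AND PROOFS =====

-- the value both programs store for an in-range node found in set1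
def pvEntry (depth : List Int) (pmin : Int) (node : Int) (ms : List Int) : Int :=
  min pmin ((PySem.List.min? (ms.map (fun i => PySem.List.pyGetD depth i 0 - PySem.List.pyGetD depth node 0)) (fun x => x)).getD 0)

-- the value stored at a nonzero index
def pvA (set1 : List (Int × List Int)) (pmin : Int) (depth : List Int) (j : Int) : Int :=
  match set1.lookup j with
  | none => pmin
  | some ms => pvEntry depth pmin j ms

lemma lookup_self_of_nodup {ps : List (Int × List Int)} (hnd : (ps.map Prod.fst).Nodup) :
    ∀ kv ∈ ps, ps.lookup kv.1 = some kv.2 := by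
  induction ps with
  | nil => intro kv h; simp at h
  | cons p rest ih =>
    obtain ⟨k, v⟩ := p
    simp only [List.map_cons, List.nodup_cons] at hnd
    intro kv hmem
    rcases List.mem_cons.mp hmem with h | h
    · subst h; simp [List.lookup]
    · have hne : (kv.1 == k) = false := by
        refine beq_eq_false_iff_ne.mpr ?_
        intro he
        apply hnd.1
        rw [← he]
        exact List.mem_map_of_mem (f := Prod.fst) h
      simp [List.lookup, hne, ih hnd.2 kv h]

lemma mem_of_lookup_eq_some {ps : List (Int × List Int)} {a : Int} {v : List Int}
    (h : ps.lookup a = some v) : (a, v) ∈ ps := by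
  induction ps with
  | nil => simp [List.lookup] at h
  | cons p rest ih =>
    obtain ⟨k, w⟩ := p
    by_cases he : a = k
    · subst he
      simp [List.lookup] at h
      simp [h]
    · have hne : (a == k) = false := beq_eq_false_iff_ne.mpr he
      simp only [List.lookup, hne] at h
      exact List.mem_cons_of_mem _ (ih h)

-- keys of the filtered override list form a sublist of set1's keys
lemma keys_filterMap_sublist (set1 : List (Int × List Int)) (f : (Int × List Int) → Option (Int × Int))
    (hf : ∀ kv p, f kv = some p → p.1 = kv.1) :
    ((set1.filterMap f).map Prod.fst).Sublist (set1.map Prod.fst) := by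
  induction set1 with
  | nil => simp
  | cons kv rest ih =>
    cases hc : f kv with
    | none => simpa [List.filterMap_cons, hc] using ih.cons kv.1
    | some p =>
      have : p.1 = kv.1 := hf kv p hc
      simpa [List.filterMap_cons, hc, this] using ih.cons₂ kv.1

-- the run-emitting loop of B, characterised against a pointwise description G
lemma seg_loop (pmin : Int) (G : Int → Int) (n : Int) :
    ∀ (ov : List (Int × Int)) (out : List Int) (prev : Int),
    ov.Pairwise (fun a b => a.1 < b.1) →
    (∀ p ∈ ov, prev < p.1 ∧ p.1 < n) →
    (∀ p ∈ ov, p.2 = G p.1) →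
    (∀ j : Int, prev < j → j < n → (∀ p ∈ ov, p.1 ≠ j) → G j = pmin) →
    (ov.foldl (fun (st : List Int × Int) (kv : Int × Int) =>
        (st.1 ++ List.replicate (kv.1 - st.2 - 1).toNat pmin ++ [kv.2], kv.1)) (out, prev)).1
      ++ List.replicate (n - (ov.foldl (fun (st : List Int × Int) (kv : Int × Int) =>
        (st.1 ++ List.replicate (kv.1 - st.2 - 1).toNat pmin ++ [kv.2], kv.1)) (out, prev)).2 - 1).toNat pmin
      = out ++ (PySem.List.pyRange (prev + 1) n 1).map G := by
  intro ov
  induction ov with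
  | nil =>
    intro out prev _ _ _ hmiss
    simp only [List.foldl_nil]
    congr 1
    have hall : ∀ b ∈ (PySem.List.pyRange (prev + 1) n 1).map G, b = pmin := by
      intro b hb
      obtain ⟨j, hj, rfl⟩ := List.mem_map.mp hb
      obtain ⟨h1, h2⟩ := (PySem.List.mem_pyRange_one).mp hj
      exact hmiss j (by omega) h2 (by intro p hp; simp at hp)
    have := List.eq_replicate_of_mem hall
    rw [this]
    congr 1
    simp only [List.length_map, PySem.List.length_pyRange_one]
    omega
  | cons kv rest ih =>
    intro out prev hpw hrange hval hmiss
    obtain ⟨k, v⟩ := kv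
    have hk : prev < k ∧ k < n := hrange (k, v) List.mem_cons_self
    have hrest_lt : ∀ p ∈ rest, k < p.1 := by
      intro p hp
      exact (List.pairwise_cons.mp hpw).1 p hp
    simp only [List.foldl_cons]
    rw [ih (out ++ List.replicate (k - prev - 1).toNat pmin ++ [v]) k
      (List.pairwise_cons.mp hpw).2
      (fun p hp => ⟨hrest_lt p hp, (hrange p (List.mem_cons_of_mem _ hp)).2⟩)
      (fun p hp => hval p (List.mem_cons_of_mem _ hp))
      (fun j h1 h2 hnk => hmiss j (by omega) h2 (by
        intro p hp
        rcases List.mem_cons.mp hp with h | h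
        · subst h; simp only; omega
        · exact hnk p h))]
    -- split the range at k and k+1
    rw [PySem.List.pyRange_one_append (prev + 1) k n (by omega) (by omega),
        PySem.List.pyRange_one_cons hk.2]
    have hgap : (PySem.List.pyRange (prev + 1) k 1).map G = List.replicate (k - prev - 1).toNat pmin := by
      have hall : ∀ b ∈ (PySem.List.pyRange (prev + 1) k 1).map G, b = pmin := by
        intro b hb
        obtain ⟨j, hj, rfl⟩ := List.mem_map.mp hb
        obtain ⟨h1, h2⟩ := (PySem.List.mem_pyRange_one).mp hj
        refine hmiss j (by omega) (by omega) ?_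
        intro p hp
        rcases List.mem_cons.mp hp with h | h
        · subst h; simp only; omega
        · have := hrest_lt p h; omega
      rw [List.eq_replicate_of_mem hall]
      congr 1
      simp only [List.length_map, PySem.List.length_pyRange_one]
      omega
    have hGk : G k = v := (hval (k, v) List.mem_cons_self).symm
    simp [hgap, hGk]

-- A's loop: fill-by-index over range n
lemma foldl_set_range (f : Nat → Int) :
    ∀ (n : Nat) (init : List Int), n ≤ init.length →
    (List.range n).foldl (fun s node => if node ≠ 0 then s.set node (f node) else s) init
      = (List.range n).map (fun j => if j = 0 then init.getD 0 0 else f j) ++ init.drop n := by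
  intro n
  induction n with
  | zero => intro init _; simp
  | succ n ih =>
    intro init h
    rw [List.range_succ, List.foldl_append, List.map_append, ih init (by omega)]
    by_cases h0 : n = 0
    · subst h0
      simp only [List.range_zero, List.map_nil, List.foldl_nil, List.nil_append,
        List.foldl_cons, List.drop_zero]
      rw [if_neg (by simp)]
      cases init with
      | nil => simp at h
      | cons a t => simp [List.getD]
    · simp only [List.foldl_cons, List.foldl_nil, if_pos h0]
      have hlen : ((List.range n).map (fun j => if j = 0 then init.getD 0 0 else f j)).length = n := by simp
      rw [List.set_append_right _ _ (by omega), hlen]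
      have hdrop : init.drop n = init[n] :: init.drop (n + 1) :=
        List.drop_eq_getElem_cons (by omega)
      rw [Nat.sub_self, hdrop, List.set_cons_zero]
      simp [if_neg h0]

-- A equals the common pointwise description
lemma createtableS1_eq_map (trie : List Int) (set1 : List (Int × List Int)) (pmin : Int) (depth : List Int) :
    createtableS1 trie set1 pmin depth
      = (List.range trie.length).map (fun (j : Nat) => if j = 0 then (1 : Int) else pvA set1 pmin depth ((j : Nat) : Int)) := by
  unfold createtableS1
  have hbody : (fun (s1 : List Int) (node : Nat) =>
      if node ≠ 0 then
        match set1.lookup (node : Int) with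
        | none => s1.set node pmin
        | some ms => s1.set node (min pmin ((PySem.List.min? (ms.map (fun i => PySem.List.pyGetD depth i 0 - PySem.List.pyGetD depth (node : Int) 0)) (fun x => x)).getD 0))
      else s1)
      = (fun (s : List Int) (node : Nat) => if node ≠ 0 then s.set node (pvA set1 pmin depth (node : Int)) else s) := by
    funext s node
    by_cases h0 : node = 0
    · simp [h0]
    · simp only [if_pos h0, pvA, pvEntry]
      cases set1.lookup ((node : Nat) : Int) <;> rfl
  rw [hbody, foldl_set_range _ _ _ (by simp)]
  rw [List.drop_eq_nil_of_le (by simp), List.append_nil]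
  apply List.map_congr_left
  intro j hj
  by_cases h0 : j = 0
  · have hn : 0 < trie.length := by
      have := List.mem_range.mp hj; omega
    simp [h0, List.getD_eq_getElem?_getD, hn]
  · simp [h0]

-- B equals the same description, given distinct keys
lemma createtableS1_alt_eq_map (trie : List Int) (set1 : List (Int × List Int)) (pmin : Int) (depth : List Int)
    (hnd : (set1.map Prod.fst).Nodup) :
    createtableS1_alt trie set1 pmin depth
      = (List.range trie.length).map (fun (j : Nat) => if j = 0 then (1 : Int) else pvA set1 pmin depth ((j : Nat) : Int)) := by
  have hovkeys : ((pvOverrides trie set1 pmin depth).map Prod.fst).Nodup := by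
    have hperm : (pvOverrides trie set1 pmin depth).Perm
        (set1.filterMap (fun kv =>
          if 0 < kv.1 ∧ kv.1 < (trie.length : Int) then
            some (kv.1, pvEntry depth pmin kv.1 kv.2)
          else none)) := PySem.List.sorted_perm _ _ _
    have hsub := keys_filterMap_sublist set1
      (fun kv => if 0 < kv.1 ∧ kv.1 < (trie.length : Int) then some (kv.1, pvEntry depth pmin kv.1 kv.2) else none)
      (by
        intro kv p hp
        by_cases h : 0 < kv.1 ∧ kv.1 < (trie.length : Int) <;> simp [h] at hp
        simp [← hp])
    exact ((hperm.map Prod.fst).nodup_iff).mpr (hsub.nodup hnd)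
  have hpw : (pvOverrides trie set1 pmin depth).Pairwise (fun a b => a.1 < b.1) := by
    have hle : (pvOverrides trie set1 pmin depth).Pairwise (fun a b => a.1 ≤ b.1) :=
      PySem.List.sorted_pairwise _ _
    have hne : (pvOverrides trie set1 pmin depth).Pairwise (fun a b => a.1 ≠ b.1) :=
      (List.pairwise_map).mp hovkeys
    exact (hle.and hne).imp (fun h => lt_of_le_of_ne h.1 h.2)
  have hmem : ∀ p ∈ pvOverrides trie set1 pmin depth,
      ∃ kv ∈ set1, 0 < kv.1 ∧ kv.1 < (trie.length : Int) ∧ p = (kv.1, pvEntry depth pmin kv.1 kv.2) := by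
    intro p hp
    have hp' : p ∈ set1.filterMap (fun kv =>
        if 0 < kv.1 ∧ kv.1 < (trie.length : Int) then
          some (kv.1, pvEntry depth pmin kv.1 kv.2)
        else none) := by
      exact (PySem.List.mem_sorted _ _ _ p).mp hp
    obtain ⟨kv, hkv, hfkv⟩ := List.mem_filterMap.mp hp'
    split at hfkv
    · next hcond => exact ⟨kv, hkv, hcond.1, hcond.2, (Option.some_inj.mp hfkv).symm⟩
    · exact absurd hfkv (by simp)
  have hG : ∀ p ∈ pvOverrides trie set1 pmin depth, p.2 = pvA set1 pmin depth p.1 := by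
    intro p hp
    obtain ⟨kv, hkv, _, _, rfl⟩ := hmem p hp
    simp only [pvA, lookup_self_of_nodup hnd kv hkv]
  have hmiss : ∀ j : Int, 0 < j → j < (trie.length : Int) →
      (∀ p ∈ pvOverrides trie set1 pmin depth, p.1 ≠ j) → pvA set1 pmin depth j = pmin := by
    intro j h1 h2 hnk
    cases hl : set1.lookup j with
    | none => simp [pvA, hl]
    | some ms =>
      exfalso
      have hmemj : (j, pvEntry depth pmin j ms) ∈ pvOverrides trie set1 pmin depth := by
        refine (PySem.List.mem_sorted _ _ _ _).mpr ?_
        exact List.mem_filterMap.mpr ⟨(j, ms), mem_of_lookup_eq_some hl, by simp [h1, h2, pvEntry]⟩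
      exact hnk _ hmemj rfl
  unfold createtableS1_alt
  rw [seg_loop pmin (pvA set1 pmin depth) (trie.length : Int) (pvOverrides trie set1 pmin depth)
        ((if trie.length ≠ 0 then [(1 : Int)] else [])) 0 hpw
        (fun p hp => by obtain ⟨kv, _, h1, h2, rfl⟩ := hmem p hp; exact ⟨h1, h2⟩)
        hG
        (fun j h1 h2 hnk => hmiss j h1 h2 hnk)]
  cases htrie : trie.length with
  | zero => simp [PySem.List.pyRange_one_eq_nil]
  | succ m =>
    rw [if_pos (by omega), List.range_succ_eq_map, List.map_cons, List.map_map]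
    rw [PySem.List.pyRange_one (0 + 1) ((m + 1 : Nat) : Int)]
    have harg : (((m + 1 : Nat) : Int) - (0 + 1)).toNat = m := by omega
    rw [harg, List.map_map, List.singleton_append]
    refine List.cons_eq_cons.mpr ⟨by simp, ?_⟩
    apply List.map_congr_left
    intro k hk
    simp only [Function.comp_apply]
    rw [if_neg (Nat.succ_ne_zero k)]
    congr 1
    push_cast
    ring

-- ===== VERDICT (by name: the statement is the Claim_ definition above) =====
theorem createtableS1_spec : Claim_equal_createtableS1 := by
  intro trie set1 pmin depth _ hpre
  unfold Spec_createtableS1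
  rw [createtableS1_eq_map, createtableS1_alt_eq_map trie set1 pmin depth hpre.1]
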